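-- pv_equiv track=rewrite | github.com/OpenPecha/archived | OCR-Helper-Scripts-master/work_list_spliter.py | split_work_ids
-- ===== SOURCE A (Python) =====
-- def split_work_ids(work_ids):
--     counter = 0
--     work_id_by_batch = {}
--     batch_walker = 1
--     cur_batch_work_ids = []
--
--     for work_id in work_ids:
--         if counter == 200:
--             cur_batch_work_ids.append(work_id)
--             work_id_by_batch[batch_walker] = cur_batch_work_ids
--             cur_batch_work_ids = []
--             counter = 0
--             batch_walker += 1
--         else:
--             cur_batch_work_ids.append(work_id)
--             counter += 1
--     if cur_batch_work_ids:
--         work_id_by_batch[batch_walker] = cur_batch_work_ids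
--     return work_id_by_batch
-- ===== SOURCE B (Python) =====
-- def split_work_ids(work_ids):
--     rest = list(work_ids)
--     work_id_by_batch = {}
--     batch = 1
--     while rest:
--         work_id_by_batch[batch] = rest[:201]
--         rest = rest[201:]
--         batch += 1
--     return work_id_by_batch
-- ===== Notes on version B (the rewrite author's own statement) =====
-- stated objective: simpler
-- what changed: Replaces the per-element counter/accumulator loop (with its flush-at-200 branch and trailing flush) by a while loop that slices off one 201-element batch at a time.
import Mathlib
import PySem

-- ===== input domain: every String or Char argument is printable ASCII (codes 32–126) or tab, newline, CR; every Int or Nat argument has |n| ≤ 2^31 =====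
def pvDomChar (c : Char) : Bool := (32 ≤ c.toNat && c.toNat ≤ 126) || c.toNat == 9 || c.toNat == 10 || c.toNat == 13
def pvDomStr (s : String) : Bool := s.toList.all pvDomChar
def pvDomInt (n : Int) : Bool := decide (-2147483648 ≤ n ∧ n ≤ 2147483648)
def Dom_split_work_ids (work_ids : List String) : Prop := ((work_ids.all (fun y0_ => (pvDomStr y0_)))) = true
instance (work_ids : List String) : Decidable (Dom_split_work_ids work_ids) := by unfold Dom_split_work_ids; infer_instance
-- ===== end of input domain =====

-- B replaces A's per-element counter loop (flush at 200 plus trailing flush) by a while loop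
-- slicing off one 201-element batch at a time; objective: simpler.

-- ===== PORT A =====
-- loop body of 'for work_id in work_ids'; state = (counter, work_id_by_batch, batch_walker, cur_batch_work_ids)
def aStep (st : Int × PySem.Dict Int (List String) × Int × List String) (work_id : String) :
    Int × PySem.Dict Int (List String) × Int × List String :=
  let (counter, work_id_by_batch, batch_walker, cur_batch_work_ids) := st
  if counter == 200 then
    (0, work_id_by_batch.insert batch_walker (cur_batch_work_ids ++ [work_id]),
     batch_walker + 1, [])
  else
    (counter + 1, work_id_by_batch, batch_walker, cur_batch_work_ids ++ [work_id])

def split_work_ids (work_ids : List String) : List (Int × List String) :=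
  let st := work_ids.foldl aStep (0, PySem.Dict.empty, 1, [])
  let work_id_by_batch := st.2.1
  let batch_walker := st.2.2.1
  let cur_batch_work_ids := st.2.2.2
  (if cur_batch_work_ids ≠ [] then work_id_by_batch.insert batch_walker cur_batch_work_ids
   else work_id_by_batch).items

-- ===== PORT B =====
-- rest[201:] is List.drop 201 (nonnegative bound; cited for the termination proof of the while loop)
theorem slice_from_201 (xs : List String) :
    PySem.List.slice xs (some 201) none = xs.drop 201 := by
  exact_mod_cast PySem.List.slice_from_natCast xs 201

-- the 'while rest:' loop of Source B; rest[:201] / rest[201:] via PySem.List.slice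
def altGo : List String → PySem.Dict Int (List String) → Int → PySem.Dict Int (List String)
  | [], work_id_by_batch, _ => work_id_by_batch
  | x :: xs, work_id_by_batch, batch =>
    altGo (PySem.List.slice (x :: xs) (some 201) none)
      (work_id_by_batch.insert batch (PySem.List.slice (x :: xs) none (some 201))) (batch + 1)
termination_by rest _ _ => rest.length
decreasing_by
  rw [slice_from_201]
  simp

def split_work_ids_alt (work_ids : List String) : List (Int × List String) :=
  (altGo work_ids PySem.Dict.empty 1).items

-- ===== PRECONDITION & SPEC =====
def Spec_split_work_ids (work_ids : List String) (out : List (Int × List String)) : Prop := out = split_work_ids_alt work_ids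
instance (work_ids : List String) (out : List (Int × List String)) : Decidable (Spec_split_work_ids work_ids out) := by unfold Spec_split_work_ids; infer_instance

-- ===== CLAIM (what is proved, stated in full; the proofs are below) =====
def Claim_equal_split_work_ids : Prop := ∀ (work_ids : List String), Dom_split_work_ids work_ids → Spec_split_work_ids work_ids (split_work_ids work_ids)

-- ===== LEMMAS AND PROOFS =====

-- rest[:201] is List.take 201
theorem slice_to_201 (xs : List String) :
    PySem.List.slice xs none (some 201) = xs.take 201 := by
  exact_mod_cast PySem.List.slice_to_natCast xs 201

-- proof-side reference chunking: the batches of l numbered from b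
def chunks : List String → Int → List (Int × List String)
  | [], _ => []
  | x :: xs, b => (b, (x :: xs).take 201) :: chunks ((x :: xs).drop 201) (b + 1)
termination_by l _ => l.length
decreasing_by
  simp

-- the final flush of A, applied to the loop state
def aFinish (st : Int × PySem.Dict Int (List String) × Int × List String) :
    List (Int × List String) :=
  (if st.2.2.2 ≠ [] then st.2.1.insert st.2.2.1 st.2.2.2 else st.2.1).items

theorem not_contains_of_keys_lt (d : PySem.Dict Int (List String)) (b : Int)
    (hk : ∀ k ∈ d.keys, k < b) : d.contains b = false := by
  rw [← Bool.not_eq_true, PySem.Dict.contains_iff_mem_keys]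
  intro hmem
  exact absurd rfl (ne_of_lt (hk b hmem))

theorem altGo_items : ∀ (n : Nat) (rest : List String) (d : PySem.Dict Int (List String)) (b : Int),
    rest.length ≤ n → (∀ k ∈ d.keys, k < b) → (altGo rest d b).items = d.items ++ chunks rest b := by
  intro n
  induction n with
  | zero =>
    intro rest d b hn hk
    rcases rest with _ | ⟨x, xs⟩
    · rw [altGo, chunks]
      simp
    · simp at hn
  | succ n ih =>
    intro rest d b hn hk
    rcases rest with _ | ⟨x, xs⟩
    · rw [altGo, chunks]
      simp
    · rw [altGo, chunks, slice_from_201, slice_to_201]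
      rw [ih _ _ _ (by simp at hn ⊢; omega)
        (by intro k hmem
            rcases (PySem.Dict.mem_keys_insert _ _ _ _).1 hmem with h | h
            · omega
            · have := hk k h; omega)]
      rw [PySem.Dict.items_insert_of_not_contains _ _ (not_contains_of_keys_lt d b hk)]
      simp

theorem aLoop (rest : List String) : ∀ (cur : List String) (d : PySem.Dict Int (List String)) (b : Int),
    cur.length ≤ 200 → (∀ k ∈ d.keys, k < b) →
    aFinish (rest.foldl aStep ((cur.length : Int), d, b, cur)) = d.items ++ chunks (cur ++ rest) b := by
  induction rest with
  | nil =>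
    intro cur d b hlen hk
    rcases cur with _ | ⟨y, ys⟩
    · simp only [List.nil_append, List.foldl_nil]
      rw [chunks]
      simp [aFinish]
    · simp only [List.foldl_nil, List.append_nil, aFinish]
      rw [if_pos (by simp), PySem.Dict.items_insert_of_not_contains _ _ (not_contains_of_keys_lt d b hk)]
      rw [chunks]
      have h1 : (y :: ys).take 201 = y :: ys := List.take_of_length_le (by simp at hlen ⊢; omega)
      have h2 : (y :: ys).drop 201 = [] := List.drop_eq_nil_of_le (by simp at hlen ⊢; omega)
      rw [h1, h2, chunks]
  | cons x rs ih =>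
    intro cur d b hlen hk
    simp only [List.foldl_cons]
    by_cases h200 : cur.length = 200
    · have hc : aStep ((cur.length : Int), d, b, cur) x
          = (0, d.insert b (cur ++ [x]), b + 1, []) := by
        simp [aStep, h200]
      rw [hc]
      have := ih [] (d.insert b (cur ++ [x])) (b + 1) (by simp)
        (by intro k hmem
            rcases (PySem.Dict.mem_keys_insert _ _ _ _).1 hmem with h | h
            · omega
            · have := hk k h; omega)
      simp only [List.length_nil, Nat.cast_zero, List.nil_append] at this
      rw [this]
      rw [PySem.Dict.items_insert_of_not_contains _ _ (not_contains_of_keys_lt d b hk)]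
      have hchunk : chunks (cur ++ x :: rs) b = (b, cur ++ [x]) :: chunks rs (b + 1) := by
        rcases cur with _ | ⟨y, ys⟩
        · simp at h200
        · rw [show (y :: ys) ++ x :: rs = y :: (ys ++ x :: rs) by simp, chunks]
          have ht : (y :: (ys ++ x :: rs)).take 201 = (y :: ys) ++ [x] := by
            simp at h200
            rw [show (y :: (ys ++ x :: rs)) = ((y :: ys) ++ [x]) ++ rs by simp, List.take_append]
            rw [List.take_of_length_le (by simp; omega)]
            have hz : 201 - ((y :: ys) ++ [x]).length = 0 := by simp; omega
            rw [hz]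
            simp
          have hd : (y :: (ys ++ x :: rs)).drop 201 = rs := by
            simp at h200
            rw [show (y :: (ys ++ x :: rs)) = ((y :: ys) ++ [x]) ++ rs by simp, List.drop_append]
            rw [List.drop_eq_nil_of_le (by simp; omega)]
            have hz : 201 - ((y :: ys) ++ [x]).length = 0 := by simp; omega
            rw [hz]
            simp
          rw [ht, hd]
      rw [hchunk]
      simp
    · have hc : aStep ((cur.length : Int), d, b, cur) x
          = (((cur ++ [x]).length : Int), d, b, cur ++ [x]) := by
        simp only [aStep]
        rw [if_neg (by simp; omega)]
        simp
      rw [hc, ih (cur ++ [x]) d b (by simp; omega) hk]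
      simp

theorem split_work_ids_eq_chunks (work_ids : List String) :
    split_work_ids work_ids = chunks work_ids 1 := by
  have h0 : split_work_ids work_ids
      = aFinish (work_ids.foldl aStep ((List.length ([] : List String) : Int), PySem.Dict.empty, 1, [])) := by
    rfl
  have hemp : PySem.Dict.empty.items = ([] : List (Int × List String)) := rfl
  have hkeys : ∀ k ∈ (PySem.Dict.empty : PySem.Dict Int (List String)).keys, k < 1 := by
    simp [PySem.Dict.keys, hemp]
  rw [h0, aLoop work_ids [] PySem.Dict.empty 1 (by simp) hkeys, hemp]
  simp

theorem split_work_ids_alt_eq_chunks (work_ids : List String) :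
    split_work_ids_alt work_ids = chunks work_ids 1 := by
  unfold split_work_ids_alt
  have hemp : PySem.Dict.empty.items = ([] : List (Int × List String)) := rfl
  rw [altGo_items work_ids.length work_ids PySem.Dict.empty 1 (le_refl _)
    (by simp [PySem.Dict.keys, hemp]), hemp]
  simp

-- ===== VERDICT (by name: the statement is the Claim_ definition above) =====
theorem split_work_ids_spec : Claim_equal_split_work_ids := by
  intro work_ids _
  unfold Spec_split_work_ids
  rw [split_work_ids_eq_chunks, split_work_ids_alt_eq_chunks]
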